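-- pv_equiv track=rewrite | github.com/blqis/Linear-Cryptanalysis- | linear_cryptanalysis.py | parite
-- ===== SOURCE A (Python) =====
-- def parite(X, Y):
--
--     res = 0
--     mask = 1
--     for i in range(4):
--
--         x = X & mask
--         y = Y & mask
--         res = res ^ x ^ y
--         X = X >> 1
--         Y = Y >> 1
--
--     return res
-- ===== SOURCE B (Python) =====
-- def parite(X, Y):
--     # simpler: result is the parity of the set bits of the low nibbles' XOR
--     return ((X & 15) ^ (Y & 15)).bit_count() & 1
-- ===== Notes on version B (the rewrite author's own statement) =====
-- stated objective: simpler
-- what changed: Replaces the 4-iteration bit loop with running XOR accumulator and in-place shifts by a single closed-form expression: the parity (bit_count() & 1) of the XOR of the two low nibbles.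
import Mathlib
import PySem

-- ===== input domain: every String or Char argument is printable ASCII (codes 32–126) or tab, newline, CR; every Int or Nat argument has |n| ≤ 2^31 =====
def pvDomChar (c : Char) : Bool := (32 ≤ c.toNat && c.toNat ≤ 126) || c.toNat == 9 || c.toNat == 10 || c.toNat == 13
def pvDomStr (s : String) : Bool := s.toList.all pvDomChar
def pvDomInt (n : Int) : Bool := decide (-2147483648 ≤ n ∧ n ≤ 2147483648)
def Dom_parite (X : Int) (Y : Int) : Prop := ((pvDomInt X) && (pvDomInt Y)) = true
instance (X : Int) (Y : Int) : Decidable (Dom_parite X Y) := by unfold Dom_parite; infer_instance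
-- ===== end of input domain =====

-- B replaces A's 4-step bit loop by one expression: the parity of the popcount of the XOR of the two low nibbles (objective: simpler).

-- ===== PORT A =====
def parite (X : Int) (Y : Int) : Int :=
  let mask : Int := 1
  ((PySem.List.pyRange 0 4 1).foldl
      (fun (st : Int × Int × Int) (_ : Int) =>
        let x := PySem.Int.band st.2.1 mask
        let y := PySem.Int.band st.2.2 mask
        (PySem.Int.bxor (PySem.Int.bxor st.1 x) y, st.2.1 >>> (1 : Nat), st.2.2 >>> (1 : Nat)))
      (0, X, Y)).1

-- ===== PORT B =====
def parite_alt (X : Int) (Y : Int) : Int :=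
  PySem.Int.band ((PySem.Int.bitCount (PySem.Int.bxor (PySem.Int.band X 15) (PySem.Int.band Y 15)) : Int)) 1

-- ===== PRECONDITION & SPEC =====
def Spec_parite (X : Int) (Y : Int) (out : Int) : Prop := out = parite_alt X Y
instance (X : Int) (Y : Int) (out : Int) : Decidable (Spec_parite X Y out) := by unfold Spec_parite; infer_instance

-- ===== CLAIM (what is proved, stated in full; the proofs are below) =====
def Claim_equal_parite : Prop := ∀ (X : Int) (Y : Int), Dom_parite X Y → Spec_parite X Y (parite X Y)

-- ===== LEMMAS AND PROOFS =====

-- masking with 15 is taking the residue mod 16, also on negatives (Python two's complement)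
theorem pv_band15 (a : Int) : PySem.Int.band a 15 = a % 16 := by
  by_cases h : 0 ≤ a
  · simp [PySem.Int.band, h]
    rw [Nat.and_two_pow_sub_one_eq_mod a.toNat 4]
    omega
  · simp [PySem.Int.band, h]
    have h2 : 15 &&& ((-a).toNat - 1) = ((-a).toNat - 1) % 16 := by
      rw [Nat.and_comm]; exact Nat.and_two_pow_sub_one_eq_mod _ 4
    rw [h2]
    omega

-- the two ports agree on all 256 pairs of nibbles
theorem pv_key : ∀ (a b : Fin 16), parite a.val b.val = parite_alt a.val b.val := by decide

theorem pv_eq (X Y : Int) : parite X Y = parite_alt X Y := by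
  have hr : (0:Int) ≤ X % 16 ∧ X % 16 < 16 :=
    ⟨Int.emod_nonneg X (by norm_num), Int.emod_lt_of_pos X (by norm_num)⟩
  have hs : (0:Int) ≤ Y % 16 ∧ Y % 16 < 16 :=
    ⟨Int.emod_nonneg Y (by norm_num), Int.emod_lt_of_pos Y (by norm_num)⟩
  have hA : parite X Y = parite (X % 16) (Y % 16) := by
    simp only [parite]
    rw [show PySem.List.pyRange 0 4 1 = [0,1,2,3] from by decide]
    norm_num [List.foldl, PySem.Int.band_one, Int.shiftRight_eq_div_pow, PySem.Int.mod_eq_emod_of_pos]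
    have e1 : X / 2 % 2 = X % 16 / 2 % 2 := by omega
    have e2 : X / 2 / 2 % 2 = X % 16 / 2 / 2 % 2 := by omega
    have e3 : X / 2 / 2 / 2 % 2 = X % 16 / 2 / 2 / 2 % 2 := by omega
    have f1 : Y / 2 % 2 = Y % 16 / 2 % 2 := by omega
    have f2 : Y / 2 / 2 % 2 = Y % 16 / 2 / 2 % 2 := by omega
    have f3 : Y / 2 / 2 / 2 % 2 = Y % 16 / 2 / 2 / 2 % 2 := by omega
    rw [e1, e2, e3, f1, f2, f3]
  have hB : parite_alt X Y = parite_alt (X % 16) (Y % 16) := by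
    simp only [parite_alt, pv_band15]
    rw [Int.emod_emod_of_dvd X (by norm_num : (16:Int) ∣ 16),
        Int.emod_emod_of_dvd Y (by norm_num : (16:Int) ∣ 16)]
  have hx : X % 16 = ((X % 16).toNat : Int) := by omega
  have hy : Y % 16 = ((Y % 16).toNat : Int) := by omega
  rw [hA, hB, hx, hy]
  exact pv_key ⟨(X % 16).toNat, by omega⟩ ⟨(Y % 16).toNat, by omega⟩

-- ===== VERDICT (by name: the statement is the Claim_ definition above) =====
theorem parite_spec : Claim_equal_parite := by
  intro X Y _
  exact pv_eq X Y
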